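-- pv_equiv track=rewrite | github.com/jdf3/CtCI | python/8-recursion-and-dynamic-programming/robotgrid.py | find_path_bottom_up
-- ===== SOURCE A (Python) =====
-- def find_path_bottom_up(grid, pos, target):
--   path = []
--   if grid[pos[0]][pos[1]] == 1: return path
--   path.append(pos)
--
--   visited = set()
--
--   while len(path) > 0 and path[-1] != target:
--     pos = path[-1]
--     if pos[0] < len(grid) - 1 and grid[pos[0]+1][pos[1]] != 1 and not (pos[0] + 1, pos[1]) in visited:
--       new_pos = (pos[0] + 1, pos[1])
--       path.append(new_pos)
--       visited.add(new_pos)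
--     elif pos[1] < len(grid[0]) - 1 and grid[pos[0]][pos[1]+1] != 1 and not (pos[0], pos[1] + 1) in visited:
--       new_pos = (pos[0], pos[1] + 1)
--       path.append(new_pos)
--       visited.add(new_pos)
--     else:
--       path.pop()
--
--   return path
-- ===== SOURCE B (Python) =====
-- def find_path_bottom_up(grid, pos, target):
--     # Recursive DFS that returns the path functionally (None = dead end):
--     # down is tried before right, and `visited` keeps cells whose subtree
--     # already failed, instead of A's explicit while-loop stack machine.
--     if grid[pos[0]][pos[1]] == 1:
--         return []
--     visited = set()
--
--     def dfs(p):
--         if p == target: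
--             return [p]
--         r, c = p
--         down = (r + 1, c)
--         if r < len(grid) - 1 and grid[r + 1][c] != 1 and down not in visited:
--             visited.add(down)
--             tail = dfs(down)
--             if tail is not None:
--                 return [p] + tail
--         right = (r, c + 1)
--         if c < len(grid[0]) - 1 and grid[r][c + 1] != 1 and right not in visited:
--             visited.add(right)
--             tail = dfs(right)
--             if tail is not None:
--                 return [p] + tail
--         return None
--
--     found = dfs(pos)
--     return found if found is not None else []
-- ===== Notes on version B (the rewrite author's own statement) =====
-- stated objective: alternative
-- what changed: A's explicit while-loop stack machine (which re-examines the top cell after every pop) is replaced by a recursive DFS helper that returns the path functionally (None on dead ends, consing the current cell onto the recursive result), trying down then right with a persistent failed-cell set.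
-- outside the precondition, e.g. on find_path_bottom_up([[0], [0, 0]], (0, 0), (5, 5)): A returns [], B returns []
import Mathlib
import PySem

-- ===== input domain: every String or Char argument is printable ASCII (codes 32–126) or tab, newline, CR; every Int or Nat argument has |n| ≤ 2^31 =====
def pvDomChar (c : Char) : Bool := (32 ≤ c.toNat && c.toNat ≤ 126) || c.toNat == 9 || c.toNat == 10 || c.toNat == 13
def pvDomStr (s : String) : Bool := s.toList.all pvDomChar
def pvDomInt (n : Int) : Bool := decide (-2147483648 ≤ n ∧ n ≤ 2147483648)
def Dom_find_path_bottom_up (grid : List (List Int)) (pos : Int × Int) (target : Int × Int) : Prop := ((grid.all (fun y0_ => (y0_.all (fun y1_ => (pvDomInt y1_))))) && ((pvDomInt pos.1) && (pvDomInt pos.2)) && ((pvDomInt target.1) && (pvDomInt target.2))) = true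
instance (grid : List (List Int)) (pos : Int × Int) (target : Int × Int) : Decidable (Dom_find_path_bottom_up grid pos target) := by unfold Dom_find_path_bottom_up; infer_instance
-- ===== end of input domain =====

-- B replaces A's explicit while-loop stack machine by a recursive DFS (down
-- first, then right) that returns the path functionally (none = dead end)
-- with a persistent failed-cell set; same return value, no speed claim.

-- ===== shared helpers (both Pythons evaluate these identical expressions) =====

-- grid[r][c] as an Option (none = Python IndexError, excluded by Pre_)
def pvCell (grid : List (List Int)) (r c : Int) : Option Int :=
  (PySem.List.pyGet? grid r).bind (fun row => PySem.List.pyGet? row c)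

-- 'grid[r][c] != 1' where a failed lookup (Python IndexError) counts as False
def pvOk (o : Option Int) : Bool :=
  match o with
  | some x => x != 1
  | none => false

-- len(grid[0])  (grid[0] exists whenever the loop is reached: the start lookup succeeded)
def pvW (grid : List (List Int)) : Int :=
  (((PySem.List.pyGet? grid 0).getD []).length : Int)

-- the down-move guard: pos[0] < len(grid)-1 and grid[pos[0]+1][pos[1]] != 1 and (pos[0]+1,pos[1]) not in visited
def pvGd (grid : List (List Int)) (v : List (Int × Int)) (p : Int × Int) : Bool :=
  decide (p.1 < (grid.length : Int) - 1) && pvOk (pvCell grid (p.1 + 1) p.2)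
    && !(PySem.Set.contains v (p.1 + 1, p.2))

-- the right-move guard: pos[1] < len(grid[0])-1 and grid[pos[0]][pos[1]+1] != 1 and (pos[0],pos[1]+1) not in visited
def pvGr (grid : List (List Int)) (v : List (Int × Int)) (p : Int × Int) : Bool :=
  decide (p.2 < pvW grid - 1) && pvOk (pvCell grid p.1 (p.2 + 1))
    && !(PySem.Set.contains v (p.1, p.2 + 1))

-- fuel bounds (totality guards only; proved sufficient below): every cell ever
-- pushed/visited lies in pvCand
def pvL (grid : List (List Int)) : Nat := grid.foldr (fun row m => max row.length m) 0

def pvCand (grid : List (List Int)) : List (Int × Int) :=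
  (List.range (2 * grid.length)).flatMap (fun i =>
    (List.range (2 * pvL grid)).map (fun j =>
      (((i : Int) - (grid.length : Int)), ((j : Int) - (pvL grid : Int)))))

def pvFuel (grid : List (List Int)) : Nat := 2 * (pvCand grid).length + 2

-- ===== PORT A =====
-- A's while loop; path is kept top-of-stack-first (Python appends/pops at the
-- end) and reversed on return — exact.  Fuel never runs out (proved below).
def pvLoopA (grid : List (List Int)) (target : Int × Int) :
    Nat → List (Int × Int) → List (Int × Int) → List (Int × Int)
  | 0, path, _ => path.reverse
  | n + 1, path, v =>
    match path with
    | [] => []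
    | p :: rest =>
      if p = target then (p :: rest).reverse
      else if pvGd grid v p then
        pvLoopA grid target n ((p.1 + 1, p.2) :: p :: rest) (PySem.Set.add v (p.1 + 1, p.2))
      else if pvGr grid v p then
        pvLoopA grid target n ((p.1, p.2 + 1) :: p :: rest) (PySem.Set.add v (p.1, p.2 + 1))
      else
        pvLoopA grid target n rest v

def find_path_bottom_up (grid : List (List Int)) (pos : Int × Int) (target : Int × Int) : List (Int × Int) :=
  match pvCell grid pos.1 pos.2 with
  | none => []  -- Python raises IndexError here; excluded by Pre_
  | some x =>
    if x = 1 then []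
    else pvLoopA grid target (pvFuel grid) [pos] PySem.Set.empty

-- ===== PORT B =====
-- B's own fuel (totality guard only; proved sufficient below)
def pvLB (g : List (List Int)) : Nat := (g.map List.length).foldl Nat.max 0

def pvFuelB (g : List (List Int)) : Nat := (2 * g.length + 1) * (2 * pvLB g + 1)

-- B's recursive dfs helper; the Python returns a list (the path from the cell
-- to target) or None, and mutates the shared 'visited', threaded here as the
-- second component -- exact.  Fuel never runs out (proved below).
def pvDfsB (g : List (List Int)) (tgt : Int × Int) :
    Nat → (Int × Int) → List (Int × Int) →
    Option (List (Int × Int)) × List (Int × Int)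
  | 0, _, seen => (none, seen)
  | k + 1, (i, j), seen =>
    if (i, j) = tgt then (some [(i, j)], seen)
    else
      match (if decide (i < (g.length : Int) - 1) &&
                 (match (PySem.List.pyGet? g (i + 1)).bind
                     (fun r0 => PySem.List.pyGet? r0 j) with
                  | some z => z != 1
                  | none => false) &&
                 !(PySem.Set.contains seen (i + 1, j)) then
               pvDfsB g tgt k (i + 1, j) (PySem.Set.add seen (i + 1, j))
             else (none, seen)) with
      | (some tl, seen1) => (some ((i, j) :: tl), seen1)
      | (none, seen1) =>
        match (if decide (j < (((PySem.List.pyGet? g 0).getD []).length : Int) - 1) &&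
                   (match (PySem.List.pyGet? g i).bind
                       (fun r0 => PySem.List.pyGet? r0 (j + 1)) with
                    | some z => z != 1
                    | none => false) &&
                   !(PySem.Set.contains seen1 (i, j + 1)) then
                 pvDfsB g tgt k (i, j + 1) (PySem.Set.add seen1 (i, j + 1))
               else (none, seen1)) with
        | (some tl, seen2) => (some ((i, j) :: tl), seen2)
        | (none, seen2) => (none, seen2)

def find_path_bottom_up_alt (grid : List (List Int)) (pos : Int × Int) (target : Int × Int) : List (Int × Int) :=
  match (PySem.List.pyGet? grid pos.1).bind (fun r0 => PySem.List.pyGet? r0 pos.2) with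
  | none => []  -- Python raises IndexError here; excluded by Pre_
  | some z =>
    if z = 1 then []
    else
      match pvDfsB grid target (pvFuelB grid) pos PySem.Set.empty with
      | (some pth, _) => pth
      | (none, _) => []

-- ===== PRECONDITION & SPEC =====
-- Pre_ excludes inputs where the start lookup grid[pos[0]][pos[1]] raises
-- IndexError, and ragged (non-rectangular) grids, on which A's walk can raise
-- IndexError mid-path (on some ragged grids A still returns normally; those
-- are excluded too).
def Pre_find_path_bottom_up (grid : List (List Int)) (pos : Int × Int) (target : Int × Int) : Prop :=
  (pvCell grid pos.1 pos.2).isSome = true ∧ ∀ row ∈ grid, (row.length : Int) = pvW grid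

instance (grid : List (List Int)) (pos : Int × Int) (target : Int × Int) : Decidable (Pre_find_path_bottom_up grid pos target) := by unfold Pre_find_path_bottom_up; infer_instance

def pvWitness_find_path_bottom_up : List (List Int) × (Int × Int) × (Int × Int) :=
  ([[0, 0], [1, 0]], (0, 0), (1, 1))

def Spec_find_path_bottom_up (grid : List (List Int)) (pos : Int × Int) (target : Int × Int) (out : List (Int × Int)) : Prop := out = find_path_bottom_up_alt grid pos target
instance (grid : List (List Int)) (pos : Int × Int) (target : Int × Int) (out : List (Int × Int)) : Decidable (Spec_find_path_bottom_up grid pos target out) := by unfold Spec_find_path_bottom_up; infer_instance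

-- ===== CLAIM (what is proved, stated in full; the proofs are below) =====
def Claim_equal_find_path_bottom_up : Prop := ∀ (grid : List (List Int)) (pos : Int × Int) (target : Int × Int), Dom_find_path_bottom_up grid pos target → Pre_find_path_bottom_up grid pos target → Spec_find_path_bottom_up grid pos target (find_path_bottom_up grid pos target)

-- ===== LEMMAS AND PROOFS =====

-- pvDfsB's inline guards are exactly pvGd/pvGr (definitional unfolding)
theorem pvDfsB_succ (grid : List (List Int)) (target : Int × Int) (n : Nat)
    (p : Int × Int) (v : List (Int × Int)) :
    pvDfsB grid target (n + 1) p v =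
      (if p = target then (some [p], v)
       else
         match (if pvGd grid v p then
                  pvDfsB grid target n (p.1 + 1, p.2) (PySem.Set.add v (p.1 + 1, p.2))
                else (none, v)) with
         | (some tail, w) => (some (p :: tail), w)
         | (none, w) =>
           match (if pvGr grid w p then
                    pvDfsB grid target n (p.1, p.2 + 1) (PySem.Set.add w (p.1, p.2 + 1))
                  else (none, w)) with
           | (some tail, w2) => (some (p :: tail), w2)
           | (none, w2) => (none, w2)) := rfl

-- number of still-unvisited candidate cells
def pvFree (grid : List (List Int)) (v : List (Int × Int)) : Nat :=
  ((pvCand grid).filter (fun c => !(PySem.Set.contains v c))).length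

-- loop measure: 2 free cells + stack height
def pvMeas (grid : List (List Int)) (v : List (Int × Int)) (path : List (Int × Int)) : Nat :=
  2 * pvFree grid v + path.length

theorem pvGd_iff (grid : List (List Int)) (v : List (Int × Int)) (p : Int × Int) :
    pvGd grid v p = true ↔
      p.1 < (grid.length : Int) - 1 ∧ pvOk (pvCell grid (p.1 + 1) p.2) = true ∧
        (p.1 + 1, p.2) ∉ v := by
  simp [pvGd, PySem.Set.contains_iff, and_assoc]

theorem pvGr_iff (grid : List (List Int)) (v : List (Int × Int)) (p : Int × Int) :
    pvGr grid v p = true ↔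
      p.2 < pvW grid - 1 ∧ pvOk (pvCell grid p.1 (p.2 + 1)) = true ∧
        (p.1, p.2 + 1) ∉ v := by
  simp [pvGr, PySem.Set.contains_iff, and_assoc]

theorem pvGd_false_of_mem (grid : List (List Int)) (v : List (Int × Int)) (p : Int × Int)
    (h : (p.1 + 1, p.2) ∈ v) : pvGd grid v p = false := by
  rcases hb : pvGd grid v p with _ | _
  · rfl
  · exact absurd ((pvGd_iff grid v p).mp hb).2.2 (not_not_intro h)

theorem pvGr_false_of_mem (grid : List (List Int)) (v : List (Int × Int)) (p : Int × Int)
    (h : (p.1, p.2 + 1) ∈ v) : pvGr grid v p = false := by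
  rcases hb : pvGr grid v p with _ | _
  · rfl
  · exact absurd ((pvGr_iff grid v p).mp hb).2.2 (not_not_intro h)

theorem pvGd_false_mono (grid : List (List Int)) (v w : List (Int × Int)) (p : Int × Int)
    (h : pvGd grid v p = false) (hvw : ∀ y ∈ v, y ∈ w) : pvGd grid w p = false := by
  rcases hb : pvGd grid w p with _ | _
  · rfl
  · exfalso
    obtain ⟨h1, h2, h3⟩ := (pvGd_iff grid w p).mp hb
    have : pvGd grid v p = true := (pvGd_iff grid v p).mpr ⟨h1, h2, fun hm => h3 (hvw _ hm)⟩
    simp [this] at h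

theorem mem_pvCand (grid : List (List Int)) (r c : Int) :
    (r, c) ∈ pvCand grid ↔
      -(grid.length : Int) ≤ r ∧ r < (grid.length : Int) ∧
        -(pvL grid : Int) ≤ c ∧ c < (pvL grid : Int) := by
  unfold pvCand
  simp only [List.mem_flatMap, List.mem_map, List.mem_range, Prod.mk.injEq]
  constructor
  · rintro ⟨i, hi, j, hj, h1, h2⟩
    simp only [List.pure_def, List.bind_eq_flatMap, List.mem_flatMap, List.mem_range,
      List.mem_cons] at hi hj
    obtain ⟨a, ha, ha2 | ha2⟩ := hi
    · obtain ⟨b, hb, hb2 | hb2⟩ := hj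
      · omega
      · cases hb2
    · cases ha2
  · rintro ⟨h1, h2, h3, h4⟩
    refine ⟨r + grid.length, ?_, c + pvL grid, ?_, by omega, by omega⟩
    · simp only [List.pure_def, List.bind_eq_flatMap, List.mem_flatMap, List.mem_range,
        List.mem_cons]
      exact ⟨(r + grid.length).toNat, by omega, Or.inl (by omega)⟩
    · simp only [List.pure_def, List.bind_eq_flatMap, List.mem_flatMap, List.mem_range,
        List.mem_cons]
      exact ⟨(c + pvL grid).toNat, by omega, Or.inl (by omega)⟩

theorem pvRowLen_le (grid : List (List Int)) (row : List Int) (h : row ∈ grid) :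
    row.length ≤ pvL grid := by
  induction grid with
  | nil => cases h
  | cons hd tl ih =>
    rcases List.mem_cons.mp h with h | h
    · subst h
      exact le_max_left _ _
    · exact le_trans (ih h) (le_max_right _ _)

theorem cand_of_ok (grid : List (List Int)) (r c : Int)
    (h : pvOk (pvCell grid r c) = true) : (r, c) ∈ pvCand grid := by
  unfold pvCell at h
  rcases hg : PySem.List.pyGet? grid r with _ | row
  · rw [hg] at h
    simp [pvOk] at h
  · rcases hr : PySem.List.pyGet? row c with _ | x
    · rw [hg] at h
      simp only [Option.bind_some] at h
      rw [hr] at h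
      simp [pvOk] at h
    · have hrow : PySem.Raise.InRange grid.length r := by
        by_contra hcon
        rw [← PySem.List.pyGet?_eq_none_iff] at hcon
        rw [hcon] at hg
        cases hg
      have hcol : PySem.Raise.InRange row.length c := by
        by_contra hcon
        rw [← PySem.List.pyGet?_eq_none_iff] at hcon
        rw [hcon] at hr
        cases hr
      have hmem : row ∈ grid := by
        apply PySem.List.mem_of_pyGet?_eq_some
        exact hg
      have hlen : row.length ≤ pvL grid := pvRowLen_le grid row hmem
      obtain ⟨hr1, hr2⟩ := hrow
      obtain ⟨hc1, hc2⟩ := hcol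
      exact (mem_pvCand grid r c).mpr ⟨hr1, hr2, by omega, by omega⟩

theorem pvFilter_length_le {α : Type} (l : List α) (p q : α → Bool)
    (himp : ∀ a, q a = true → p a = true) :
    (l.filter q).length ≤ (l.filter p).length := by
  induction l with
  | nil => simp
  | cons a l ih =>
    simp only [List.filter_cons]
    rcases hq : q a with _ | _
    · rcases hp : p a with _ | _ <;> simp [hp] <;> omega
    · have hp := himp a hq
      simp [hp, hq]
      omega

theorem pvFilter_length_lt {α : Type} (l : List α) (p q : α → Bool)
    (himp : ∀ a, q a = true → p a = true) (x : α) (hx : x ∈ l)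
    (hpx : p x = true) (hqx : q x = false) :
    (l.filter q).length < (l.filter p).length := by
  induction l with
  | nil => cases hx
  | cons a l ih =>
    simp only [List.filter_cons]
    rcases List.mem_cons.mp hx with h | h
    · subst h
      rw [hpx, hqx]
      have := pvFilter_length_le l p q himp
      simp
      omega
    · rcases hq : q a with _ | _
      · have := ih h
        rcases hp : p a with _ | _ <;> simp [hp] <;> omega
      · have hp := himp a hq
        have := ih h
        simp [hp, hq]
        omega

theorem pvNotContains_iff (v : List (Int × Int)) (x : Int × Int) :
    (!PySem.Set.contains v x) = true ↔ x ∉ v := by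
  simp only [Bool.not_eq_true']
  constructor
  · intro h hm
    rw [(PySem.Set.contains_iff v x).mpr hm] at h
    cases h
  · intro h
    rcases hb : PySem.Set.contains v x with _ | _
    · rfl
    · exact absurd ((PySem.Set.contains_iff v x).mp hb) h

theorem pvFree_lt_add (grid : List (List Int)) (v : List (Int × Int)) (x : Int × Int)
    (hx : x ∈ pvCand grid) (hnv : x ∉ v) :
    pvFree grid (PySem.Set.add v x) < pvFree grid v := by
  unfold pvFree
  refine pvFilter_length_lt _ _ _ (fun a ha => ?_) x hx ?_ ?_
  · rw [pvNotContains_iff] at ha ⊢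
    exact fun hm => ha ((PySem.Set.mem_add _ _ _).mpr (Or.inl hm))
  · rw [pvNotContains_iff]
    exact hnv
  · have : PySem.Set.contains (PySem.Set.add v x) x = true :=
      (PySem.Set.contains_iff _ _).mpr ((PySem.Set.mem_add _ _ _).mpr (Or.inr rfl))
    rw [this]
    rfl

theorem pvFree_mono (grid : List (List Int)) (v w : List (Int × Int))
    (hvw : ∀ y ∈ v, y ∈ w) : pvFree grid w ≤ pvFree grid v := by
  unfold pvFree
  apply pvFilter_length_le
  intro a ha
  rw [pvNotContains_iff] at ha ⊢
  exact fun hm => ha (hvw _ hm)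

-- visited only grows through pvDfsB
theorem pvDfsB_mono (grid : List (List Int)) (target : Int × Int) :
    ∀ (n : Nat) (p : Int × Int) (v : List (Int × Int)) (y : Int × Int),
      y ∈ v → y ∈ (pvDfsB grid target n p v).2 := by
  intro n
  induction n with
  | zero =>
    intro p v y hy
    simpa [pvDfsB] using hy
  | succ n ih =>
    intro p v y hy
    have hadd : ∀ (w : PySem.Set (Int × Int)) (z : Int × Int), y ∈ w → y ∈ PySem.Set.add w z :=
      fun w z hw => (PySem.Set.mem_add _ _ _).mpr (Or.inl hw)
    rw [pvDfsB_succ]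
    by_cases hpt : p = target
    · simpa [hpt] using hy
    simp only [if_neg hpt]
    by_cases hgd : pvGd grid v p = true
    · simp only [hgd, if_true]
      rcases hc1 : pvDfsB grid target n (p.1 + 1, p.2) (PySem.Set.add v (p.1 + 1, p.2)) with ⟨o1, w1⟩
      have h1 : y ∈ w1 := by
        have := ih (p.1 + 1, p.2) (PySem.Set.add v (p.1 + 1, p.2)) y (hadd _ _ hy)
        rw [hc1] at this
        exact this
      cases o1 with
      | some tail => simpa using h1
      | none =>
        simp only
        by_cases hgr : pvGr grid w1 p = true
        · simp only [hgr, if_true]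
          rcases hc2 : pvDfsB grid target n (p.1, p.2 + 1) (PySem.Set.add w1 (p.1, p.2 + 1)) with ⟨o2, w2⟩
          have h2 : y ∈ w2 := by
            have := ih (p.1, p.2 + 1) (PySem.Set.add w1 (p.1, p.2 + 1)) y (hadd _ _ h1)
            rw [hc2] at this
            exact this
          cases o2 <;> simpa using h2
        · simp only [hgr, Bool.false_eq_true, if_false]
          simpa using h1
    · simp only [hgd, Bool.false_eq_true, if_false]
      by_cases hgr : pvGr grid v p = true
      · simp only [hgr, if_true]
        rcases hc2 : pvDfsB grid target n (p.1, p.2 + 1) (PySem.Set.add v (p.1, p.2 + 1)) with ⟨o2, w2⟩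
        have h2 : y ∈ w2 := by
          have := ih (p.1, p.2 + 1) (PySem.Set.add v (p.1, p.2 + 1)) y (hadd _ _ hy)
          rw [hc2] at this
          exact this
        cases o2 <;> simpa using h2
      · simp only [hgr, Bool.false_eq_true, if_false]
        simpa using hy

-- fuel irrelevance for the loop above the measure
theorem pvLoopA_congr (grid : List (List Int)) (target : Int × Int) :
    ∀ (n m : Nat) (path v : List (Int × Int)),
      pvMeas grid v path < n → pvMeas grid v path < m →
      pvLoopA grid target n path v = pvLoopA grid target m path v := by
  intro n
  induction n with
  | zero =>
    intro m path v h1 h2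
    exact absurd h1 (Nat.not_lt_zero _)
  | succ n ih =>
    intro m path v h1 h2
    cases m with
    | zero => exact absurd h2 (Nat.not_lt_zero _)
    | succ m =>
      simp only [pvLoopA]
      cases path with
      | nil => rfl
      | cons p rest =>
        by_cases hpt : p = target
        · simp [hpt]
        simp only [if_neg hpt]
        by_cases hgd : pvGd grid v p = true
        · obtain ⟨_, hgd2, hgd3⟩ := (pvGd_iff grid v p).mp hgd
          have hlt := pvFree_lt_add grid v _ (cand_of_ok grid (p.1 + 1) p.2 hgd2) hgd3
          simp only [hgd, if_true]
          apply ih <;>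
            (simp only [pvMeas, List.length_cons] at h1 h2 ⊢; omega)
        · simp only [hgd, Bool.false_eq_true, if_false]
          by_cases hgr : pvGr grid v p = true
          · obtain ⟨_, hgr2, hgr3⟩ := (pvGr_iff grid v p).mp hgr
            have hlt := pvFree_lt_add grid v _ (cand_of_ok grid p.1 (p.2 + 1) hgr2) hgr3
            simp only [hgr, if_true]
            apply ih <;>
              (simp only [pvMeas, List.length_cons] at h1 h2 ⊢; omega)
          · simp only [hgr, Bool.false_eq_true, if_false]
            apply ih <;>
              (simp only [pvMeas, List.length_cons] at h1 h2 ⊢; omega)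

-- the simulation: the loop starting with top cell p equals the dfs from p
theorem pvSim (grid : List (List Int)) (target : Int × Int) :
    ∀ (n fa fb : Nat) (p : Int × Int) (rest v : List (Int × Int)),
      pvFree grid v ≤ n → pvMeas grid v (p :: rest) < fa → pvFree grid v < fb →
      pvLoopA grid target fa (p :: rest) v =
        (match pvDfsB grid target fb p v with
         | (some sp, _) => rest.reverse ++ sp
         | (none, w) => pvLoopA grid target (pvMeas grid w rest + 1) rest w) := by
  intro n
  induction n using Nat.strong_induction_on with
  | _ n ih =>
  intro fa fb p rest v hn hfa hfb
  cases fa with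
  | zero => exact absurd hfa (Nat.not_lt_zero _)
  | succ a =>
  cases fb with
  | zero => exact absurd hfb (Nat.not_lt_zero _)
  | succ b =>
  by_cases hpt : p = target
  · simp [pvLoopA, pvDfsB_succ, hpt]
  conv_lhs => rw [pvLoopA]
  rw [pvDfsB_succ]
  simp only [if_neg hpt]
  by_cases hgd : pvGd grid v p = true
  · obtain ⟨hgd1, hgd2, hgd3⟩ := (pvGd_iff grid v p).mp hgd
    have hcand1 : (p.1 + 1, p.2) ∈ pvCand grid := cand_of_ok grid (p.1 + 1) p.2 hgd2
    have hlt1 : pvFree grid (PySem.Set.add v (p.1 + 1, p.2)) < pvFree grid v :=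
      pvFree_lt_add grid v _ hcand1 hgd3
    simp only [hgd, if_true]
    have hIH1 := ih (pvFree grid (PySem.Set.add v (p.1 + 1, p.2))) (by omega) a b
      (p.1 + 1, p.2) (p :: rest) (PySem.Set.add v (p.1 + 1, p.2)) le_rfl
      (by simp only [pvMeas, List.length_cons] at hfa ⊢; omega) (by omega)
    rw [hIH1]
    rcases hc1 : pvDfsB grid target b (p.1 + 1, p.2) (PySem.Set.add v (p.1 + 1, p.2)) with ⟨o1, w1⟩
    have hsub1 : ∀ y ∈ PySem.Set.add v (p.1 + 1, p.2), y ∈ w1 := by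
      intro y hy
      have := pvDfsB_mono grid target b (p.1 + 1, p.2) (PySem.Set.add v (p.1 + 1, p.2)) y hy
      rw [hc1] at this
      exact this
    have hd_in : (p.1 + 1, p.2) ∈ w1 :=
      hsub1 _ ((PySem.Set.mem_add _ _ _).mpr (Or.inr rfl))
    have hfle1 : pvFree grid w1 ≤ pvFree grid (PySem.Set.add v (p.1 + 1, p.2)) :=
      pvFree_mono grid _ _ hsub1
    cases o1 with
    | some sp =>
      simp [List.append_assoc]
    | none =>
      simp only
      -- the loop re-examines p with visited w1: down guard now closed
      conv_lhs => rw [pvLoopA]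
      simp only [if_neg hpt, pvGd_false_of_mem grid w1 p hd_in,
        Bool.false_eq_true, if_false]
      by_cases hgr : pvGr grid w1 p = true
      · obtain ⟨hgr1, hgr2, hgr3⟩ := (pvGr_iff grid w1 p).mp hgr
        have hcand2 : (p.1, p.2 + 1) ∈ pvCand grid := cand_of_ok grid p.1 (p.2 + 1) hgr2
        have hlt2 : pvFree grid (PySem.Set.add w1 (p.1, p.2 + 1)) < pvFree grid w1 :=
          pvFree_lt_add grid _ _ hcand2 hgr3
        simp only [hgr, if_true]
        have hIH2 := ih (pvFree grid (PySem.Set.add w1 (p.1, p.2 + 1))) (by omega)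
          (pvMeas grid w1 (p :: rest)) b (p.1, p.2 + 1) (p :: rest)
          (PySem.Set.add w1 (p.1, p.2 + 1)) le_rfl
          (by simp only [pvMeas, List.length_cons]; omega) (by omega)
        rw [hIH2]
        rcases hc2 : pvDfsB grid target b (p.1, p.2 + 1) (PySem.Set.add w1 (p.1, p.2 + 1)) with ⟨o2, w2⟩
        have hsub2 : ∀ y ∈ PySem.Set.add w1 (p.1, p.2 + 1), y ∈ w2 := by
          intro y hy
          have := pvDfsB_mono grid target b (p.1, p.2 + 1) (PySem.Set.add w1 (p.1, p.2 + 1)) y hy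
          rw [hc2] at this
          exact this
        have hd_in2 : (p.1 + 1, p.2) ∈ w2 :=
          hsub2 _ ((PySem.Set.mem_add _ _ _).mpr (Or.inl hd_in))
        have hrt_in2 : (p.1, p.2 + 1) ∈ w2 :=
          hsub2 _ ((PySem.Set.mem_add _ _ _).mpr (Or.inr rfl))
        have hfle2 : pvFree grid w2 ≤ pvFree grid (PySem.Set.add w1 (p.1, p.2 + 1)) :=
          pvFree_mono grid _ _ hsub2
        cases o2 with
        | some sp =>
          simp [List.append_assoc]
        | none =>
          simp only
          conv_lhs => rw [pvLoopA]
          simp only [if_neg hpt, pvGd_false_of_mem grid w2 p hd_in2,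
            pvGr_false_of_mem grid w2 p hrt_in2, Bool.false_eq_true, if_false]
          exact pvLoopA_congr grid target (pvMeas grid w2 (p :: rest))
            (pvMeas grid w2 rest + 1) rest w2
            (by simp only [pvMeas, List.length_cons]; omega)
            (by omega)
      · simp only [hgr, Bool.false_eq_true, if_false]
        exact pvLoopA_congr grid target (pvMeas grid w1 (p :: rest))
          (pvMeas grid w1 rest + 1) rest w1
          (by simp only [pvMeas, List.length_cons]; omega)
          (by omega)
  · have hgd' : pvGd grid v p = false := by
      rcases hb : pvGd grid v p with _ | _
      · rfl
      · exact absurd hb hgd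
    simp only [hgd', Bool.false_eq_true, if_false]
    by_cases hgr : pvGr grid v p = true
    · obtain ⟨hgr1, hgr2, hgr3⟩ := (pvGr_iff grid v p).mp hgr
      have hcand2 : (p.1, p.2 + 1) ∈ pvCand grid := cand_of_ok grid p.1 (p.2 + 1) hgr2
      have hlt2 : pvFree grid (PySem.Set.add v (p.1, p.2 + 1)) < pvFree grid v :=
        pvFree_lt_add grid v _ hcand2 hgr3
      simp only [hgr, if_true]
      have hIH2 := ih (pvFree grid (PySem.Set.add v (p.1, p.2 + 1))) (by omega) a b
        (p.1, p.2 + 1) (p :: rest) (PySem.Set.add v (p.1, p.2 + 1)) le_rfl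
        (by simp only [pvMeas, List.length_cons] at hfa ⊢; omega) (by omega)
      rw [hIH2]
      rcases hc2 : pvDfsB grid target b (p.1, p.2 + 1) (PySem.Set.add v (p.1, p.2 + 1)) with ⟨o2, w2⟩
      have hsub2 : ∀ y ∈ PySem.Set.add v (p.1, p.2 + 1), y ∈ w2 := by
        intro y hy
        have := pvDfsB_mono grid target b (p.1, p.2 + 1) (PySem.Set.add v (p.1, p.2 + 1)) y hy
        rw [hc2] at this
        exact this
      have hsubv2 : ∀ y ∈ v, y ∈ w2 :=
        fun y hy => hsub2 _ ((PySem.Set.mem_add _ _ _).mpr (Or.inl hy))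
      have hrt_in2 : (p.1, p.2 + 1) ∈ w2 :=
        hsub2 _ ((PySem.Set.mem_add _ _ _).mpr (Or.inr rfl))
      have hfle2 : pvFree grid w2 ≤ pvFree grid (PySem.Set.add v (p.1, p.2 + 1)) :=
        pvFree_mono grid _ _ hsub2
      cases o2 with
      | some sp =>
        simp [List.append_assoc]
      | none =>
        simp only
        conv_lhs => rw [pvLoopA]
        simp only [if_neg hpt, pvGd_false_mono grid v w2 p hgd' hsubv2,
          pvGr_false_of_mem grid w2 p hrt_in2, Bool.false_eq_true, if_false]
        exact pvLoopA_congr grid target (pvMeas grid w2 (p :: rest))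
          (pvMeas grid w2 rest + 1) rest w2
          (by simp only [pvMeas, List.length_cons]; omega)
          (by omega)
    · have hgr' : pvGr grid v p = false := by
        rcases hb : pvGr grid v p with _ | _
        · rfl
        · exact absurd hb hgr
      simp only [hgr', Bool.false_eq_true, if_false]
      exact pvLoopA_congr grid target a (pvMeas grid v rest + 1) rest v
        (by simp only [pvMeas, List.length_cons] at hfa ⊢; omega)
        (by omega)

theorem pvFoldlMax (l : List Nat) : ∀ a, l.foldl Nat.max a = Nat.max a (l.foldr Nat.max 0) := by
  induction l with
  | nil => intro a; simp
  | cons b l ih =>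
    intro a
    simp only [List.foldl_cons, List.foldr_cons, ih (Nat.max a b), Nat.max_assoc]

theorem pvLB_eq (grid : List (List Int)) : pvLB grid = pvL grid := by
  unfold pvLB pvL
  rw [pvFoldlMax]
  simp [List.foldr_map]

theorem pvCand_len (grid : List (List Int)) :
    (pvCand grid).length = 2 * grid.length * (2 * pvL grid) := by
  unfold pvCand
  rw [List.length_flatMap]
  simp [Function.comp_def, List.map_const']

-- ===== VERDICT (by name: the statement is the Claim_ definition above) =====
theorem find_path_bottom_up_spec : Claim_equal_find_path_bottom_up := by
  intro grid pos target hdom hpre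
  unfold Spec_find_path_bottom_up
  unfold find_path_bottom_up find_path_bottom_up_alt
  rcases hc : pvCell grid pos.1 pos.2 with _ | x
  · unfold pvCell at hc
    simp only [hc]
  · unfold pvCell at hc
    simp only [hc]
    by_cases hx : x = 1
    · simp [hx]
    · simp only [if_neg hx]
      have hfree0 : pvFree grid PySem.Set.empty ≤ (pvCand grid).length := by
        unfold pvFree
        exact List.length_filter_le _ _
      have hsim := pvSim grid target (pvFree grid PySem.Set.empty) (pvFuel grid)
        (pvFuelB grid) pos [] PySem.Set.empty le_rfl
        (by simp only [pvMeas, pvFuel, List.length_cons, List.length_nil]; omega)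
        (by
          have h2 := pvCand_len grid
          have h3 : pvFuelB grid = 2 * grid.length * (2 * pvL grid) +
              2 * grid.length + 2 * pvL grid + 1 := by
            unfold pvFuelB
            rw [pvLB_eq]
            ring
          omega)
      rw [hsim]
      rcases hd : pvDfsB grid target (pvFuelB grid) pos PySem.Set.empty with ⟨o, w⟩
      cases o with
      | some sp => simp
      | none =>
        simp only
        conv_lhs => rw [pvLoopA]
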